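-- pv_equiv track=rewrite | github.com/ogmobot/code-scraps | py/moon_processor.py | blank_unneeded_lines
-- ===== SOURCE A (Python) =====
-- def blank_unneeded_lines(table):
--     # Turns |1234|----|1234|----| into |1234|----|1234|    |
--     ncols = 4
--     colwidth = 4
--     from_string = ("-"*colwidth +"|")*ncols + "\n"
--     to_string   = from_string.replace("-", " ")
--     for _ in range(ncols):
--         table = table.replace(from_string, to_string)
--         from_string = from_string[colwidth + 1:]
--         to_string   = to_string[colwidth + 1:]
--     return table
-- ===== SOURCE B (Python) =====
-- def blank_unneeded_lines(table):
--     # One pass over the lines: blank up to 4 trailing "----|" groups of each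
--     # newline-terminated line, instead of four whole-string replace passes.
--     parts = table.split("\n")
--     out = []
--     for seg in parts[:-1]:
--         k = 0
--         while k < 4 and seg.endswith("----|" * (k + 1)):
--             k += 1
--         out.append(seg[:len(seg) - 5 * k] + "    |" * k)
--     out.append(parts[-1])
--     return "\n".join(out)
-- ===== Notes on version B (the rewrite author's own statement) =====
-- stated objective: alternative
-- what changed: Instead of A's four sequential whole-string str.replace passes with shrinking dash patterns, B splits the text on newlines once and blanks up to four trailing '----|' groups of each newline-terminated line directly.
import Mathlib
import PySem

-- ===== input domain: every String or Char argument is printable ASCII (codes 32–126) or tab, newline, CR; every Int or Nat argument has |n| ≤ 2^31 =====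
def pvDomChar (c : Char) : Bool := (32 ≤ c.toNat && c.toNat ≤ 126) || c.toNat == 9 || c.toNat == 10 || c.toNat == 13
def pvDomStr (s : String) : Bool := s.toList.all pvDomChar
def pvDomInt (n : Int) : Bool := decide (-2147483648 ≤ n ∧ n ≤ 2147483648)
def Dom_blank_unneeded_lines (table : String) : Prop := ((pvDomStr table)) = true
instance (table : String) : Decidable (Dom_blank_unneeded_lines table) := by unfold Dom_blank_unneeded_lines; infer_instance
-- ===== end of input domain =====

-- B rewrites A's four whole-string replace passes as one pass over the split lines
-- (objective: alternative decomposition, same observable behaviour).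

-- ===== PORT A =====
-- Python string repetition s * n, ported as "".join([s] * n) (exact: n concatenated copies).
def pvRep (n : Nat) (s : String) : String := PySem.Str.join "" (List.replicate n s)

def blank_unneeded_lines (table : String) : String :=
  let ncols : Nat := 4
  let colwidth : Nat := 4
  let from_string : String := pvRep ncols (pvRep colwidth "-" ++ "|") ++ "\n"
  let to_string : String := PySem.Str.replace from_string "-" " "
  let st := (PySem.List.pyRange 0 (ncols : Int)).foldl
    (fun (st : String × String × String) _ =>
      (PySem.Str.replace st.1 st.2.1 st.2.2,
       PySem.Str.slice st.2.1 (some ((colwidth : Int) + 1)) none,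
       PySem.Str.slice st.2.2 (some ((colwidth : Int) + 1)) none))
    (table, from_string, to_string)
  st.1

-- ===== PORT B =====
-- B's while loop: k = 0; while k < 4 and seg.endswith("----|"*(k+1)): k += 1
def pvCount (seg : String) (k : Nat) : Nat :=
  if k < 4 ∧ PySem.Str.endswith seg (pvRep (k + 1) "----|") = true then pvCount seg (k + 1) else k
termination_by 4 - k

def blank_unneeded_lines_alt (table : String) : String :=
  -- table.split("\n"): split? is `some …` whenever the separator is nonempty, so getD's default is never used
  let parts := (PySem.Str.split? table "\n").getD []
  let out := (PySem.List.slice parts none (some (-1))).foldl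
    (fun out seg =>
      let k := pvCount seg 0
      out ++ [PySem.Str.slice seg none (some (PySem.Str.len seg - 5 * (k : Int))) ++ pvRep k "    |"])
    ([] : List String)
  -- parts[-1]: split always returns a nonempty list, so the getD default is never used
  let out := out ++ [(PySem.List.pyGet? parts (-1)).getD ""]
  PySem.Str.join "\n" out

-- ===== PRECONDITION & SPEC =====
def Spec_blank_unneeded_lines (table : String) (out : String) : Prop := out = blank_unneeded_lines_alt table
instance (table : String) (out : String) : Decidable (Spec_blank_unneeded_lines table out) := by unfold Spec_blank_unneeded_lines; infer_instance

-- ===== CLAIM (what is proved, stated in full; the proofs are below) =====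
def Claim_equal_blank_unneeded_lines : Prop := ∀ (table : String), Dom_blank_unneeded_lines table → Spec_blank_unneeded_lines table (blank_unneeded_lines table)

-- ===== LEMMAS AND PROOFS =====

-- dash group "----|" * k and its blank version "    |" * k, as character lists
def pvG (k : Nat) : List Char := (List.replicate k "----|".toList).flatten
def pvS (k : Nat) : List Char := (List.replicate k "    |".toList).flatten

-- canonical split on '\n' (always returns a nonempty list of newline-free segments)
def splitNl : List Char → List (List Char)
  | [] => [[]]
  | c :: r =>
    if c = '\n' then [] :: splitNl r
    else
      match splitNl r with
      | [] => [[c]]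
      | s :: ss => (c :: s) :: ss

-- canonical join with '\n'
def joinNl : List (List Char) → List Char
  | [] => []
  | [s] => s
  | s :: t :: r => s ++ '\n' :: joinNl (t :: r)

-- what one replace pass of A does to one newline-terminated segment
def stepA (g sp s : List Char) : List Char :=
  if g <:+ s then s.take (s.length - g.length) ++ sp else s

-- what one replace pass of A does, per split segment (last segment untouched)
def procA (g sp : List Char) : List (List Char) → List (List Char)
  | [] => []
  | [s] => [s]
  | s :: t :: r => stepA g sp s :: procA g sp (t :: r)

-- what B does per non-last segment
def kOf (seg : List Char) : Nat :=
  if ¬ pvG 1 <:+ seg then 0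
  else if ¬ pvG 2 <:+ seg then 1
  else if ¬ pvG 3 <:+ seg then 2
  else if ¬ pvG 4 <:+ seg then 3
  else 4

def fB (seg : List Char) : List Char :=
  seg.take (seg.length - 5 * kOf seg) ++ pvS (kOf seg)

def procB : List (List Char) → List (List Char)
  | [] => []
  | [s] => [s]
  | s :: t :: r => fB s :: procB (t :: r)

-- fuel-free version of PySem.Chars.replace.go (pattern o :: o' is nonempty)
def repl (o : Char) (o' nw : List Char) : List Char → List Char → List Char
  | [], acc => acc.reverse
  | c :: t, acc =>
    if (o :: o').isPrefixOf (c :: t) then repl o o' nw (t.drop o'.length) (nw.reverse ++ acc)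
    else repl o o' nw t (c :: acc)
termination_by l => l.length
decreasing_by all_goals (simp; try omega)

theorem go_eq_repl (o : Char) (o' nw : List Char) :
    ∀ (fuel : Nat) (l acc : List Char), l.length ≤ fuel →
      PySem.Chars.replace.go (o :: o') nw fuel l acc = repl o o' nw l acc := by
  intro fuel
  induction fuel with
  | zero =>
    intro l acc h
    have hl : l = [] := by cases l with | nil => rfl | cons a b => simp at h
    subst hl
    simp [PySem.Chars.replace.go, repl]
  | succ n ih =>
    intro l acc h
    cases l with
    | nil => simp [PySem.Chars.replace.go, repl]
    | cons c t =>
      rw [PySem.Chars.replace.go, repl]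
      simp only [List.length_cons] at h
      split
      · rw [show List.drop (o :: o').length (c :: t) = t.drop o'.length by simp]
        exact ih _ _ (by simp; omega)
      · exact ih _ _ (by omega)

theorem replace_eq_repl (o : Char) (o' nw l : List Char) :
    PySem.Chars.replace l (o :: o') nw = repl o o' nw l [] := by
  rw [PySem.Chars.replace, if_neg (by simp)]
  exact go_eq_repl o o' nw l.length l [] (le_refl _)

theorem repl_nomatch (o : Char) (o' nw : List Char) (a : Char) (ha : a ∈ o :: o') :
    ∀ (cs acc : List Char), a ∉ cs → repl o o' nw cs acc = acc.reverse ++ cs := by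
  intro cs
  induction cs with
  | nil => intro acc _; simp [repl]
  | cons c t ih =>
    intro acc hmem
    rw [repl]
    have hnp : ¬ (o :: o').isPrefixOf (c :: t) = true := by
      intro hp
      exact hmem ((List.isPrefixOf_iff_prefix.mp hp).subset ha)
    rw [if_neg hnp, ih (c :: acc) (by simp at hmem ⊢; exact hmem.2)]
    simp

theorem prefix_nl_iff (g : List Char) (hg : '\n' ∉ g) :
    ∀ (cs r : List Char), '\n' ∉ cs → ((g ++ ['\n']) <+: (cs ++ '\n' :: r) ↔ g = cs) := by
  induction g with
  | nil =>
    intro cs r hcs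
    cases cs with
    | nil => simp
    | cons a t =>
      simp only [List.nil_append, List.cons_append]
      constructor
      · intro h
        have := h.head (by simp)
        simp at this
        exact absurd this.symm (by simp at hcs; intro he; exact hcs.1 he.symm)
      · intro h; exact absurd h (by simp)
  | cons x g' ih =>
    intro cs r hcs
    cases cs with
    | nil =>
      simp only [List.nil_append]
      constructor
      · intro h
        have := h.head (by simp)
        simp at this
        exact absurd this (by simp at hg; exact fun he => hg.1 he.symm)
      · intro h; exact absurd h (by simp)
    | cons a t =>
      simp only [List.cons_append, List.cons_prefix_cons]
      rw [ih (by simp at hg; exact hg.2) t r (by simp at hcs; exact hcs.2)]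
      constructor
      · rintro ⟨h1, h2⟩; rw [h1, h2]
      · intro h; injection h with h1 h2; exact ⟨h1, by rw [h2]⟩

theorem repl_seg (o : Char) (o' g nw : List Char) (hoo : o :: o' = g ++ ['\n'])
    (hg : '\n' ∉ g) (hg0 : g ≠ []) :
    ∀ (cs : List Char), '\n' ∉ cs → ∀ (r acc : List Char),
      repl o o' nw (cs ++ '\n' :: r) acc =
        repl o o' nw r
          (if g <:+ cs then nw.reverse ++ (cs.take (cs.length - g.length)).reverse ++ acc
           else '\n' :: cs.reverse ++ acc) := by
  intro cs
  induction cs with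
  | nil =>
    intro _ r acc
    rw [List.nil_append, repl]
    have hnp : ¬ (o :: o').isPrefixOf ('\n' :: r) = true := by
      intro hp
      have hpre := List.isPrefixOf_iff_prefix.mp hp
      rw [hoo] at hpre
      cases g with
      | nil => exact hg0 rfl
      | cons x g' =>
        simp only [List.cons_append, List.cons_prefix_cons] at hpre
        exact (by simp at hg; exact fun he => hg.1 he.symm : x ≠ '\n') hpre.1
    rw [if_neg hnp, if_neg (by simp [hg0] : ¬ g <:+ ([] : List Char))]
    simp
  | cons c t ih =>
    intro hcs r acc
    have hc : c ≠ '\n' := by simp at hcs; exact fun h => hcs.1 h.symm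
    have ht : '\n' ∉ t := by simp at hcs; exact hcs.2
    rw [List.cons_append, repl]
    have hiff : (o :: o').isPrefixOf (c :: (t ++ '\n' :: r)) = true ↔ g = c :: t := by
      rw [List.isPrefixOf_iff_prefix, hoo, show c :: (t ++ '\n' :: r) = (c :: t) ++ '\n' :: r by simp]
      exact prefix_nl_iff g hg (c :: t) r hcs
    by_cases hgeq : g = c :: t
    · rw [if_pos (hiff.mpr hgeq)]
      have hlen : o'.length = t.length + 1 := by
        have := congrArg List.length hoo
        rw [hgeq] at this
        simp at this
        omega
      rw [show (t ++ '\n' :: r).drop o'.length = r by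
        rw [hlen, show t.length + 1 = (t ++ ['\n']).length by simp,
          show t ++ '\n' :: r = (t ++ ['\n']) ++ r by simp, List.drop_left]]
      rw [if_pos (hgeq ▸ (List.suffix_refl (c :: t)) : g <:+ c :: t)]
      rw [hgeq]
      simp
    · rw [if_neg (fun h => hgeq (hiff.mp h))]
      rw [ih ht r (c :: acc)]
      congr 1
      by_cases hsuf : g <:+ t
      · have hsufc : g <:+ c :: t := hsuf.trans (List.suffix_cons c t)
        rw [if_pos hsuf, if_pos hsufc]
        have hle : g.length ≤ t.length := hsuf.length_le
        have htake : (c :: t).take ((c :: t).length - g.length) =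
            c :: t.take (t.length - g.length) := by
          simp only [List.length_cons]
          rw [show t.length + 1 - g.length = (t.length - g.length) + 1 by omega,
            List.take_succ_cons]
        rw [htake]
        simp
      · have hns : ¬ g <:+ c :: t := by
          rw [List.suffix_cons_iff]
          push Not
          exact ⟨fun h => hgeq h, hsuf⟩
        rw [if_neg hsuf, if_neg hns]
        simp

theorem joinNl_cons (x : List Char) (ys : List (List Char)) (h : ys ≠ []) :
    joinNl (x :: ys) = x ++ '\n' :: joinNl ys := by
  cases ys with
  | nil => exact absurd rfl h
  | cons t r => rfl

theorem joinNl_cons_head (c : Char) (s : List Char) (ss : List (List Char)) :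
    joinNl ((c :: s) :: ss) = c :: joinNl (s :: ss) := by
  cases ss with
  | nil => rfl
  | cons t r => simp [joinNl]

theorem procA_cons (g sp x : List Char) (ys : List (List Char)) (h : ys ≠ []) :
    procA g sp (x :: ys) = stepA g sp x :: procA g sp ys := by
  cases ys with
  | nil => exact absurd rfl h
  | cons t r => rfl

theorem procA_ne_nil (g sp : List Char) (segs : List (List Char)) (h : segs ≠ []) :
    procA g sp segs ≠ [] := by
  cases segs with
  | nil => exact absurd rfl h
  | cons s rest => cases rest with
    | nil => simp [procA]
    | cons t r => simp [procA]

theorem repl_join (o : Char) (o' g sp : List Char) (hoo : o :: o' = g ++ ['\n'])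
    (hg : '\n' ∉ g) (hg0 : g ≠ []) :
    ∀ (segs : List (List Char)), segs ≠ [] → (∀ s ∈ segs, '\n' ∉ s) → ∀ (acc : List Char),
      repl o o' (sp ++ ['\n']) (joinNl segs) acc =
        acc.reverse ++ joinNl (procA g sp segs) := by
  intro segs
  induction segs with
  | nil => intro h; exact absurd rfl h
  | cons s rest ih =>
    intro _ hfree acc
    cases rest with
    | nil =>
      rw [show joinNl [s] = s from rfl, show procA g sp [s] = [s] from rfl]
      exact repl_nomatch o o' (sp ++ ['\n']) '\n' (by rw [hoo]; simp) s acc (hfree s (by simp))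
    | cons t r =>
      rw [show joinNl (s :: t :: r) = s ++ '\n' :: joinNl (t :: r) from rfl]
      rw [repl_seg o o' g (sp ++ ['\n']) hoo hg hg0 s (hfree s (by simp)) _ _]
      rw [ih (by simp) (fun x hx => hfree x (List.mem_cons_of_mem s hx)) _]
      rw [procA_cons g sp s (t :: r) (by simp),
        joinNl_cons _ _ (procA_ne_nil g sp (t :: r) (by simp)), stepA]
      split_ifs with hsuf <;> simp

theorem replace_join (g sp : List Char) (hg : '\n' ∉ g) (hg0 : g ≠ [])
    (segs : List (List Char)) (h0 : segs ≠ []) (hfree : ∀ s ∈ segs, '\n' ∉ s) :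
    PySem.Chars.replace (joinNl segs) (g ++ ['\n']) (sp ++ ['\n']) =
      joinNl (procA g sp segs) := by
  cases g with
  | nil => exact absurd rfl hg0
  | cons x g' =>
    rw [show (x :: g') ++ ['\n'] = x :: (g' ++ ['\n']) from rfl, replace_eq_repl]
    rw [repl_join x (g' ++ ['\n']) (x :: g') sp rfl hg hg0 segs h0 hfree []]
    rfl

theorem procA_free (g sp : List Char) (hsp : '\n' ∉ sp) (segs : List (List Char))
    (hfree : ∀ s ∈ segs, '\n' ∉ s) : ∀ s ∈ procA g sp segs, '\n' ∉ s := by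
  induction segs with
  | nil => simp [procA]
  | cons s rest ih =>
    cases rest with
    | nil => simpa [procA] using hfree
    | cons t r =>
      intro u hu
      rw [procA_cons g sp s (t :: r) (by simp)] at hu
      rcases List.mem_cons.mp hu with h | h
      · subst h
        rw [stepA]
        split_ifs with hsuf
        · intro hmem
          rcases List.mem_append.mp hmem with h' | h'
          · exact hfree s (by simp) (List.take_subset _ _ h')
          · exact hsp h'
        · exact hfree s (by simp)
      · exact ih (fun x hx => hfree x (List.mem_cons_of_mem s hx)) u h

theorem splitNl_ne_nil (cs : List Char) : splitNl cs ≠ [] := by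
  cases cs with
  | nil => simp [splitNl]
  | cons c r =>
    rw [splitNl]
    split
    · simp
    · split <;> simp

theorem splitNl_free (cs : List Char) : ∀ s ∈ splitNl cs, '\n' ∉ s := by
  induction cs with
  | nil => simp [splitNl]
  | cons c r ih =>
    rw [splitNl]
    by_cases hc : c = '\n'
    · rw [if_pos hc]
      intro s hs
      rcases List.mem_cons.mp hs with h | h
      · subst h; simp
      · exact ih s h
    · rw [if_neg hc]
      cases heq : splitNl r with
      | nil => exact absurd heq (splitNl_ne_nil r)
      | cons s0 ss =>
        intro s hs
        rcases List.mem_cons.mp hs with h | h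
        · subst h
          intro hmem
          rcases List.mem_cons.mp hmem with h' | h'
          · exact hc h'.symm
          · exact ih s0 (heq ▸ List.mem_cons_self) h'
        · exact ih s (heq ▸ List.mem_cons_of_mem s0 h)

theorem joinNl_splitNl (cs : List Char) : joinNl (splitNl cs) = cs := by
  induction cs with
  | nil => rfl
  | cons c r ih =>
    rw [splitNl]
    by_cases hc : c = '\n'
    · rw [if_pos hc, joinNl_cons _ _ (splitNl_ne_nil r), ih, hc]
      rfl
    · rw [if_neg hc]
      cases heq : splitNl r with
      | nil => exact absurd heq (splitNl_ne_nil r)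
      | cons s0 ss =>
        rw [joinNl_cons_head, ← heq, ih]

-- B-side split
theorem splitOn_go_eq : ∀ (fuel : Nat) (l cur : List Char) (accs : List (List Char)),
    l.length ≤ fuel →
    PySem.Chars.splitOn.go ['\n'] fuel l cur accs =
      accs.reverse ++ (match splitNl l with
        | [] => [cur.reverse]
        | s :: ss => (cur.reverse ++ s) :: ss) := by
  intro fuel
  induction fuel with
  | zero =>
    intro l cur accs h
    have hl : l = [] := by cases l with | nil => rfl | cons a b => simp at h
    subst hl
    simp [PySem.Chars.splitOn.go, splitNl]
  | succ n ih =>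
    intro l cur accs h
    cases l with
    | nil => simp [PySem.Chars.splitOn.go, splitNl]
    | cons c t =>
      rw [PySem.Chars.splitOn.go]
      simp only [List.length_cons] at h
      by_cases hc : c = '\n'
      · rw [if_pos (by simp [List.isPrefixOf, hc])]
        rw [show List.drop ['\n'].length (c :: t) = t by simp]
        rw [ih t [] (cur.reverse :: accs) (by omega)]
        rw [splitNl, if_pos hc]
        cases heq : splitNl t with
        | nil => exact absurd heq (splitNl_ne_nil t)
        | cons s0 ss => simp
      · rw [if_neg (by simp [List.isPrefixOf]; intro he; exact hc he.symm)]
        rw [ih t (c :: cur) accs (by omega)]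
        rw [splitNl, if_neg hc]
        cases heq : splitNl t with
        | nil => exact absurd heq (splitNl_ne_nil t)
        | cons s0 ss => simp

theorem splitOn_eq_splitNl (cs : List Char) :
    PySem.Chars.splitOn cs ['\n'] = splitNl cs := by
  rw [PySem.Chars.splitOn, splitOn_go_eq (cs.length + 1) cs [] [] (by omega)]
  cases heq : splitNl cs with
  | nil => exact absurd heq (splitNl_ne_nil cs)
  | cons s0 ss => simp

-- suffix facts
theorem suffix_or_suffix (l₁ l₂ l : List Char) (h1 : l₁ <:+ l) (h2 : l₂ <:+ l) :
    l₁ <:+ l₂ ∨ l₂ <:+ l₁ := by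
  rcases List.prefix_or_prefix_of_prefix (List.reverse_prefix.mpr h1) (List.reverse_prefix.mpr h2)
    with h | h
  · exact Or.inl (List.reverse_prefix.mp h)
  · exact Or.inr (List.reverse_prefix.mp h)

theorem not_g_suffix_sp (x : List Char) (j r : Nat) (hj1 : 1 ≤ j) (hj4 : j ≤ 4)
    (hr1 : 1 ≤ r) (hr4 : r ≤ 4) : ¬ pvG j <:+ x ++ pvS r := by
  intro h
  have hsp1 : pvS 1 <:+ pvS r := by interval_cases r <;> decide
  have hspx : pvS 1 <:+ x ++ pvS r := hsp1.trans (List.suffix_append x (pvS r))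
  rcases suffix_or_suffix (pvG j) (pvS 1) _ h hspx with h' | h' <;>
    interval_cases j <;> revert h' <;> decide

theorem g_suffix_mono (j k : Nat) (hjk : j ≤ k) (hk : k ≤ 4) (seg : List Char)
    (h : pvG k <:+ seg) : pvG j <:+ seg := by
  have hk : j ≤ 4 := le_trans hjk hk
  have hsub : pvG j <:+ pvG k := by
    interval_cases j <;> interval_cases k <;> first | omega | decide
  exact hsub.trans h

-- the per-segment core: the four replace steps equal B's single blanking step
theorem seg_main (seg : List Char) :
    stepA (pvG 1) (pvS 1) (stepA (pvG 2) (pvS 2) (stepA (pvG 3) (pvS 3)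
      (stepA (pvG 4) (pvS 4) seg))) = fB seg := by
  by_cases h1 : pvG 1 <:+ seg
  · by_cases h2 : pvG 2 <:+ seg
    · by_cases h3 : pvG 3 <:+ seg
      · by_cases h4 : pvG 4 <:+ seg
        · have e4 : stepA (pvG 4) (pvS 4) seg = seg.take (seg.length - (pvG 4).length) ++ pvS 4 := by
            rw [stepA, if_pos h4]
          have e3 : stepA (pvG 3) (pvS 3) (seg.take (seg.length - (pvG 4).length) ++ pvS 4) = seg.take (seg.length - (pvG 4).length) ++ pvS 4 := by
            rw [stepA, if_neg (not_g_suffix_sp _ 3 4 (by omega) (by omega) (by omega) (by omega))]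
          have e2 : stepA (pvG 2) (pvS 2) (seg.take (seg.length - (pvG 4).length) ++ pvS 4) = seg.take (seg.length - (pvG 4).length) ++ pvS 4 := by
            rw [stepA, if_neg (not_g_suffix_sp _ 2 4 (by omega) (by omega) (by omega) (by omega))]
          have e1 : stepA (pvG 1) (pvS 1) (seg.take (seg.length - (pvG 4).length) ++ pvS 4) = seg.take (seg.length - (pvG 4).length) ++ pvS 4 := by
            rw [stepA, if_neg (not_g_suffix_sp _ 1 4 (by omega) (by omega) (by omega) (by omega))]
          rw [e4, e3, e2, e1, fB, kOf, if_neg (not_not_intro h1), if_neg (not_not_intro h2), if_neg (not_not_intro h3), if_neg (not_not_intro h4)]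
          rw [show (pvG 4).length = 5 * 4 from by decide]
        · have e4 : stepA (pvG 4) (pvS 4) seg = seg := by
            rw [stepA, if_neg h4]
          have e3 : stepA (pvG 3) (pvS 3) seg = seg.take (seg.length - (pvG 3).length) ++ pvS 3 := by
            rw [stepA, if_pos h3]
          have e2 : stepA (pvG 2) (pvS 2) (seg.take (seg.length - (pvG 3).length) ++ pvS 3) = seg.take (seg.length - (pvG 3).length) ++ pvS 3 := by
            rw [stepA, if_neg (not_g_suffix_sp _ 2 3 (by omega) (by omega) (by omega) (by omega))]
          have e1 : stepA (pvG 1) (pvS 1) (seg.take (seg.length - (pvG 3).length) ++ pvS 3) = seg.take (seg.length - (pvG 3).length) ++ pvS 3 := by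
            rw [stepA, if_neg (not_g_suffix_sp _ 1 3 (by omega) (by omega) (by omega) (by omega))]
          rw [e4, e3, e2, e1, fB, kOf, if_neg (not_not_intro h1), if_neg (not_not_intro h2), if_neg (not_not_intro h3), if_pos h4]
          rw [show (pvG 3).length = 5 * 3 from by decide]
      · have h4 : ¬ pvG 4 <:+ seg := fun h => h3 (g_suffix_mono 3 4 (by omega) (by omega) seg h)
        have e4 : stepA (pvG 4) (pvS 4) seg = seg := by
          rw [stepA, if_neg h4]
        have e3 : stepA (pvG 3) (pvS 3) seg = seg := by
          rw [stepA, if_neg h3]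
        have e2 : stepA (pvG 2) (pvS 2) seg = seg.take (seg.length - (pvG 2).length) ++ pvS 2 := by
          rw [stepA, if_pos h2]
        have e1 : stepA (pvG 1) (pvS 1) (seg.take (seg.length - (pvG 2).length) ++ pvS 2) = seg.take (seg.length - (pvG 2).length) ++ pvS 2 := by
          rw [stepA, if_neg (not_g_suffix_sp _ 1 2 (by omega) (by omega) (by omega) (by omega))]
        rw [e4, e3, e2, e1, fB, kOf, if_neg (not_not_intro h1), if_neg (not_not_intro h2), if_pos h3]
        rw [show (pvG 2).length = 5 * 2 from by decide]
    · have h3 : ¬ pvG 3 <:+ seg := fun h => h2 (g_suffix_mono 2 3 (by omega) (by omega) seg h)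
      have h4 : ¬ pvG 4 <:+ seg := fun h => h2 (g_suffix_mono 2 4 (by omega) (by omega) seg h)
      have e4 : stepA (pvG 4) (pvS 4) seg = seg := by
        rw [stepA, if_neg h4]
      have e3 : stepA (pvG 3) (pvS 3) seg = seg := by
        rw [stepA, if_neg h3]
      have e2 : stepA (pvG 2) (pvS 2) seg = seg := by
        rw [stepA, if_neg h2]
      have e1 : stepA (pvG 1) (pvS 1) seg = seg.take (seg.length - (pvG 1).length) ++ pvS 1 := by
        rw [stepA, if_pos h1]
      rw [e4, e3, e2, e1, fB, kOf, if_neg (not_not_intro h1), if_pos h2]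
      rw [show (pvG 1).length = 5 * 1 from by decide]
  · have h2 : ¬ pvG 2 <:+ seg := fun h => h1 (g_suffix_mono 1 2 (by omega) (by omega) seg h)
    have h3 : ¬ pvG 3 <:+ seg := fun h => h1 (g_suffix_mono 1 3 (by omega) (by omega) seg h)
    have h4 : ¬ pvG 4 <:+ seg := fun h => h1 (g_suffix_mono 1 4 (by omega) (by omega) seg h)
    have e4 : stepA (pvG 4) (pvS 4) seg = seg := by rw [stepA, if_neg h4]
    have e3 : stepA (pvG 3) (pvS 3) seg = seg := by rw [stepA, if_neg h3]
    have e2 : stepA (pvG 2) (pvS 2) seg = seg := by rw [stepA, if_neg h2]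
    have e1 : stepA (pvG 1) (pvS 1) seg = seg := by rw [stepA, if_neg h1]
    rw [e4, e3, e2, e1, fB, kOf, if_pos h1]
    simp [pvS]

theorem procA_chain (segs : List (List Char)) :
    procA (pvG 1) (pvS 1) (procA (pvG 2) (pvS 2) (procA (pvG 3) (pvS 3)
      (procA (pvG 4) (pvS 4) segs))) = procB segs := by
  induction segs with
  | nil => rfl
  | cons s rest ih =>
    cases rest with
    | nil => rfl
    | cons t r =>
      rw [procA_cons (pvG 4) (pvS 4) s (t :: r) (by simp),
        procA_cons (pvG 3) (pvS 3) _ _ (procA_ne_nil _ _ _ (by simp)),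
        procA_cons (pvG 2) (pvS 2) _ _ (procA_ne_nil _ _ _ (procA_ne_nil _ _ _ (by simp))),
        procA_cons (pvG 1) (pvS 1) _ _
          (procA_ne_nil _ _ _ (procA_ne_nil _ _ _ (procA_ne_nil _ _ _ (by simp)))),
        show procB (s :: t :: r) = fB s :: procB (t :: r) from rfl, seg_main, ih]

theorem intercalate_nil_flat : ∀ (l : List (List Char)), List.intercalate [] l = l.flatten := by
  intro l
  induction l with
  | nil => rfl
  | cons a t ih =>
    cases t with
    | nil => simp [List.intercalate]
    | cons b r =>
      simp only [List.intercalate] at ih ⊢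
      simp [List.intersperse] at ih ⊢
      exact ih

theorem joinNl_eq_intercalate : ∀ (l : List (List Char)), List.intercalate ['\n'] l = joinNl l := by
  intro l
  induction l with
  | nil => rfl
  | cons a t ih =>
    cases t with
    | nil => simp [List.intercalate, joinNl]
    | cons b r =>
      rw [joinNl_cons a (b :: r) (by simp), ← ih]
      rw [List.intercalate, List.intercalate, List.intersperse_cons₂]
      simp

theorem rep_toList (str : String) (k : Nat) :
    (pvRep k str).toList = (List.replicate k str.toList).flatten := by
  rw [pvRep, PySem.Str.toList_join, PySem.Chars.join,
    show ("" : String).toList = [] from rfl, intercalate_nil_flat, List.map_replicate]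

theorem pvCount_eq (seg : String) : pvCount seg 0 = kOf seg.toList := by
  have E : ∀ (k : Nat), PySem.Str.endswith seg (pvRep k "----|") = true ↔ pvG k <:+ seg.toList := by
    intro k
    rw [PySem.Str.endswith_eq, PySem.Chars.endswith_iff, rep_toList, pvG]
  by_cases h1 : pvG 1 <:+ seg.toList
  · by_cases h2 : pvG 2 <:+ seg.toList
    · by_cases h3 : pvG 3 <:+ seg.toList
      · by_cases h4 : pvG 4 <:+ seg.toList
        · rw [pvCount, if_pos ⟨by omega, (E 1).mpr h1⟩, pvCount, if_pos ⟨by omega, (E 2).mpr h2⟩,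
            pvCount, if_pos ⟨by omega, (E 3).mpr h3⟩, pvCount, if_pos ⟨by omega, (E 4).mpr h4⟩,
            pvCount, if_neg (by omega)]
          rw [kOf, if_neg (not_not_intro h1), if_neg (not_not_intro h2),
            if_neg (not_not_intro h3), if_neg (not_not_intro h4)]
        · rw [pvCount, if_pos ⟨by omega, (E 1).mpr h1⟩, pvCount, if_pos ⟨by omega, (E 2).mpr h2⟩,
            pvCount, if_pos ⟨by omega, (E 3).mpr h3⟩, pvCount,
            if_neg (fun hc => h4 ((E 4).mp hc.2))]
          rw [kOf, if_neg (not_not_intro h1), if_neg (not_not_intro h2),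
            if_neg (not_not_intro h3), if_pos h4]
      · rw [pvCount, if_pos ⟨by omega, (E 1).mpr h1⟩, pvCount, if_pos ⟨by omega, (E 2).mpr h2⟩,
          pvCount, if_neg (fun hc => h3 ((E 3).mp hc.2))]
        rw [kOf, if_neg (not_not_intro h1), if_neg (not_not_intro h2), if_pos h3]
    · rw [pvCount, if_pos ⟨by omega, (E 1).mpr h1⟩, pvCount,
        if_neg (fun hc => h2 ((E 2).mp hc.2))]
      rw [kOf, if_neg (not_not_intro h1), if_pos h2]
  · rw [pvCount, if_neg (fun hc => h1 ((E 1).mp hc.2))]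
    rw [kOf, if_pos h1]

theorem suffix_len_le (j : Nat) (hj : 1 ≤ j) (hj4 : j ≤ 4) (cs : List Char)
    (h : pvG j <:+ cs) : 5 * j ≤ cs.length := by
  have hl := h.length_le
  have hg : (pvG j).length = 5 * j := by interval_cases j <;> decide
  omega

theorem kOf_len_le (cs : List Char) : 5 * kOf cs ≤ cs.length := by
  rw [kOf]
  by_cases h1 : pvG 1 <:+ cs
  · rw [if_neg (not_not_intro h1)]
    by_cases h2 : pvG 2 <:+ cs
    · rw [if_neg (not_not_intro h2)]
      by_cases h3 : pvG 3 <:+ cs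
      · rw [if_neg (not_not_intro h3)]
        by_cases h4 : pvG 4 <:+ cs
        · rw [if_neg (not_not_intro h4)]
          exact suffix_len_le 4 (by omega) (by omega) cs h4
        · rw [if_pos h4]
          exact suffix_len_le 3 (by omega) (by omega) cs h3
      · rw [if_pos h3]
        exact suffix_len_le 2 (by omega) (by omega) cs h2
    · rw [if_pos h2]
      exact suffix_len_le 1 (by omega) (by omega) cs h1
  · rw [if_pos h1]
    omega

theorem bf_toList (seg : String) :
    (PySem.Str.slice seg none (some (PySem.Str.len seg - 5 * (pvCount seg 0 : Int))) ++
      pvRep (pvCount seg 0) "    |").toList = fB seg.toList := by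
  rw [String.toList_append, pvCount_eq, rep_toList, PySem.Str.toList_slice,
    PySem.Chars.slice_eq_listSlice, PySem.Str.len_eq]
  have hle := kOf_len_le seg.toList
  rw [PySem.List.slice_to _ (by omega :
    (0 : Int) ≤ (seg.toList.length : Int) - 5 * (kOf seg.toList : Int))]
  rw [fB, pvS]
  congr 2
  omega

theorem procB_decomp : ∀ (segs : List (List Char)), segs ≠ [] →
    procB segs = segs.dropLast.map fB ++ [(segs.getLast?).getD []] := by
  intro segs
  induction segs with
  | nil => intro h; exact absurd rfl h
  | cons s rest ih =>
    intro _
    cases rest with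
    | nil => rfl
    | cons t r =>
      rw [show procB (s :: t :: r) = fB s :: procB (t :: r) from rfl, ih (by simp)]
      simp

theorem pyGet_neg_one (l : List String) : PySem.List.pyGet? l (-1) = l.getLast? := by
  cases l with
  | nil => rfl
  | cons a t =>
    rw [PySem.List.pyGet?, PySem.List.pyIdx?]
    rw [if_neg (by omega), if_pos (by simp)]
    simp only [Option.bind_some]
    rw [List.getLast?_eq_getElem?]
    rfl

theorem foldl_app (f : String → String) : ∀ (l a : List String),
    l.foldl (fun out seg => out ++ [f seg]) a = a ++ l.map f := by
  intro l
  induction l with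
  | nil => simp
  | cons x t ih => intro a; rw [List.foldl_cons, ih, List.map_cons]; simp

-- A port evaluated to its four concrete replace passes
theorem portA_eq (t : String) :
    blank_unneeded_lines t =
      PySem.Str.replace (PySem.Str.replace (PySem.Str.replace (PySem.Str.replace t
        "----|----|----|----|\n" "    |    |    |    |\n")
        "----|----|----|\n" "    |    |    |\n")
        "----|----|\n" "    |    |\n")
        "----|\n" "    |\n" := by
  unfold blank_unneeded_lines
  simp only [show PySem.List.pyRange 0 ((4 : Nat) : Int) = [0, 1, 2, 3] from by decide,
    List.foldl]
  congr 1

theorem portA_toList (t : String) :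
    (blank_unneeded_lines t).toList =
      joinNl (procA (pvG 1) (pvS 1) (procA (pvG 2) (pvS 2) (procA (pvG 3) (pvS 3)
        (procA (pvG 4) (pvS 4) (splitNl t.toList))))) := by
  have hfree0 := splitNl_free t.toList
  have hne0 := splitNl_ne_nil t.toList
  have hfree4 := procA_free (pvG 4) (pvS 4) (by decide) _ hfree0
  have hne4 := procA_ne_nil (pvG 4) (pvS 4) _ hne0
  have hfree3 := procA_free (pvG 3) (pvS 3) (by decide) _ hfree4
  have hne3 := procA_ne_nil (pvG 3) (pvS 3) _ hne4
  have hfree2 := procA_free (pvG 2) (pvS 2) (by decide) _ hfree3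
  have hne2 := procA_ne_nil (pvG 2) (pvS 2) _ hne3
  rw [portA_eq]
  simp only [PySem.Str.toList_replace]
  rw [show ("----|----|----|----|\n" : String).toList = pvG 4 ++ ['\n'] from by decide,
    show ("    |    |    |    |\n" : String).toList = pvS 4 ++ ['\n'] from by decide,
    show ("----|----|----|\n" : String).toList = pvG 3 ++ ['\n'] from by decide,
    show ("    |    |    |\n" : String).toList = pvS 3 ++ ['\n'] from by decide,
    show ("----|----|\n" : String).toList = pvG 2 ++ ['\n'] from by decide,
    show ("    |    |\n" : String).toList = pvS 2 ++ ['\n'] from by decide,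
    show ("----|\n" : String).toList = pvG 1 ++ ['\n'] from by decide,
    show ("    |\n" : String).toList = pvS 1 ++ ['\n'] from by decide]
  conv_lhs => rw [show t.toList = joinNl (splitNl t.toList) from (joinNl_splitNl _).symm]
  rw [replace_join (pvG 4) (pvS 4) (by decide) (by decide) _ hne0 hfree0,
    replace_join (pvG 3) (pvS 3) (by decide) (by decide) _ hne4 hfree4,
    replace_join (pvG 2) (pvS 2) (by decide) (by decide) _ hne3 hfree3,
    replace_join (pvG 1) (pvS 1) (by decide) (by decide) _ hne2 hfree2]

theorem portB_toList (t : String) :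
    (blank_unneeded_lines_alt t).toList = joinNl (procB (splitNl t.toList)) := by
  -- extract the concrete split result
  obtain ⟨ps, hps, hmap⟩ : ∃ ps, PySem.Str.split? t "\n" = some ps ∧
      ps.map String.toList = splitNl t.toList := by
    have h := PySem.Str.split?_map t "\n"
    rw [show ("\n" : String).toList = ['\n'] from rfl, PySem.Chars.split?,
      if_neg (by decide), splitOn_eq_splitNl] at h
    cases hsp : PySem.Str.split? t "\n" with
    | none => rw [hsp] at h; simp at h
    | some ps =>
      rw [hsp] at h
      simp only [Option.map_some] at h
      exact ⟨ps, rfl, by injection h⟩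
  have hps_ne : ps ≠ [] := by
    intro h
    rw [h] at hmap
    exact splitNl_ne_nil t.toList hmap.symm
  unfold blank_unneeded_lines_alt
  rw [hps]
  simp only [Option.getD_some]
  rw [PySem.List.slice_to_neg_one, foldl_app, List.nil_append, pyGet_neg_one,
    PySem.Str.toList_join]
  rw [show ("\n" : String).toList = ['\n'] from rfl, PySem.Chars.join, joinNl_eq_intercalate]
  rw [procB_decomp (splitNl t.toList) (splitNl_ne_nil _)]
  congr 1
  rw [List.map_append, List.map_map]
  congr 1
  · rw [show (String.toList ∘ fun seg => PySem.Str.slice seg none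
        (some (PySem.Str.len seg - 5 * ((pvCount seg 0 : Nat) : Int))) ++ pvRep (pvCount seg 0) "    |")
      = fB ∘ String.toList from funext fun seg => bf_toList seg]
    rw [← List.map_map, ← hmap, List.map_dropLast]
  · rw [← hmap, List.getLast?_map]
    cases hl : ps.getLast? with
    | none => exact absurd (List.getLast?_eq_none_iff.mp hl) hps_ne
    | some a => rfl

-- ===== VERDICT (by name: the statement is the Claim_ definition above) =====
theorem blank_unneeded_lines_spec : Claim_equal_blank_unneeded_lines := by
  intro table _
  unfold Spec_blank_unneeded_lines
  have h := (portA_toList table).trans (by rw [procA_chain, ← portB_toList])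
  exact String.toList_inj.mp h
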